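-- pv_equiv track=rewrite | github.com/sve007/advent-of-code | 2021/problem08.py | find_uniques
-- ===== SOURCE A (Python) =====
-- def find_uniques(digits):
--     for i in digits:
--         if len(i) == 2:
--             one = i
--         elif len(i) == 3:
--             seven = i
--         elif len(i) == 4:
--             four = i
--         elif len(i) == 7:
--             eight = i
--         else:
--             continue
--     return one, four, seven, eight
-- ===== SOURCE B (Python) =====
-- def find_uniques(digits):
--     def pick(n):
--         return next(s for s in reversed(digits) if len(s) == n)
--     return pick(2), pick(4), pick(3), pick(7)
-- ===== Notes on version B (the rewrite author's own statement) =====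
-- stated objective: alternative
-- what changed: Instead of one forward pass that overwrites four branch-assigned locals (last occurrence wins), B does four independent backward searches, taking for each required length the first match in the reversed list.
import Mathlib
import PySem

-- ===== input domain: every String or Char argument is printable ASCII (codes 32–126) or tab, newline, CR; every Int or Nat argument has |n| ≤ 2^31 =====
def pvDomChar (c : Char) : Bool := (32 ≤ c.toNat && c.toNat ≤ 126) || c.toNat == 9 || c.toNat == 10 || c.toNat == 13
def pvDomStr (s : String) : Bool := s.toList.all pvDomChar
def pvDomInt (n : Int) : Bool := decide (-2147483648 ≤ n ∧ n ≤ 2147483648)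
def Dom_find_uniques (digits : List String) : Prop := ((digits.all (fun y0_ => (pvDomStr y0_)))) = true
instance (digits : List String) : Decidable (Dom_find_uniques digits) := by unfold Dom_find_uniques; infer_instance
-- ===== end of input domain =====

-- B replaces A's single forward pass overwriting four branch-assigned locals
-- with four independent backward searches (first match in the reversed list).

-- ===== PORT A =====
-- state carries (one, four, seven, eight) as Options; an unset slot at the end
-- is Python's UnboundLocalError, excluded by Pre_ (getD "" is never reached there)
def find_uniques (digits : List String) : String × String × String × String :=
  let st := digits.foldl
    (fun (s : Option String × Option String × Option String × Option String) i =>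
      if PySem.Str.len i = 2 then (some i, s.2.1, s.2.2.1, s.2.2.2)
      else if PySem.Str.len i = 3 then (s.1, s.2.1, some i, s.2.2.2)
      else if PySem.Str.len i = 4 then (s.1, some i, s.2.2.1, s.2.2.2)
      else if PySem.Str.len i = 7 then (s.1, s.2.1, s.2.2.1, some i)
      else s)
    (none, none, none, none)
  (st.1.getD "", st.2.1.getD "", st.2.2.1.getD "", st.2.2.2.getD "")

-- ===== PORT B =====
-- pick(n) = next(s for s in reversed(digits) if len(s) == n); an exhausted
-- generator is Python's StopIteration, excluded by Pre_ (getD "" never reached)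
def find_uniques_alt_pick (digits : List String) (n : Int) : Option String :=
  digits.reverse.find? (fun s => PySem.Str.len s == n)

def find_uniques_alt (digits : List String) : String × String × String × String :=
  ((find_uniques_alt_pick digits 2).getD "", (find_uniques_alt_pick digits 4).getD "",
   (find_uniques_alt_pick digits 3).getD "", (find_uniques_alt_pick digits 7).getD "")

-- ===== PRECONDITION & SPEC =====
-- Pre_ excludes inputs missing a string of one of the lengths 2, 3, 4, 7: there
-- Python A raises UnboundLocalError (and B raises StopIteration).
def Pre_find_uniques (digits : List String) : Prop :=
  (∃ i ∈ digits, PySem.Str.len i = 2) ∧ (∃ i ∈ digits, PySem.Str.len i = 3) ∧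
  (∃ i ∈ digits, PySem.Str.len i = 4) ∧ (∃ i ∈ digits, PySem.Str.len i = 7)
instance (digits : List String) : Decidable (Pre_find_uniques digits) := by
  unfold Pre_find_uniques; infer_instance

def pvWitness_find_uniques : List String := ["ab", "abcd", "abc", "abcdefg"]

def Spec_find_uniques (digits : List String) (out : String × String × String × String) : Prop := out = find_uniques_alt digits
instance (digits : List String) (out : String × String × String × String) : Decidable (Spec_find_uniques digits out) := by unfold Spec_find_uniques; infer_instance

-- ===== CLAIM (what is proved, stated in full; the proofs are below) =====
def Claim_equal_find_uniques : Prop := ∀ (digits : List String), Dom_find_uniques digits → Pre_find_uniques digits → Spec_find_uniques digits (find_uniques digits)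

-- ===== LEMMAS AND PROOFS =====

-- loop invariant: each slot of A's fold from state s equals the first match of
-- its length in the reversed suffix, falling back to s's slot
theorem find_uniques_inv (digits : List String)
    (s : Option String × Option String × Option String × Option String) :
    (digits.foldl
        (fun (s : Option String × Option String × Option String × Option String) i =>
          if PySem.Str.len i = 2 then (some i, s.2.1, s.2.2.1, s.2.2.2)
          else if PySem.Str.len i = 3 then (s.1, s.2.1, some i, s.2.2.2)
          else if PySem.Str.len i = 4 then (s.1, some i, s.2.2.1, s.2.2.2)
          else if PySem.Str.len i = 7 then (s.1, s.2.1, s.2.2.1, some i)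
          else s) s) =
      ((digits.reverse.find? (fun i => PySem.Str.len i == 2)).or s.1,
       (digits.reverse.find? (fun i => PySem.Str.len i == 4)).or s.2.1,
       (digits.reverse.find? (fun i => PySem.Str.len i == 3)).or s.2.2.1,
       (digits.reverse.find? (fun i => PySem.Str.len i == 7)).or s.2.2.2) := by
  induction digits generalizing s with
  | nil => simp
  | cons i rest ih =>
    simp only [List.foldl_cons, List.reverse_cons, List.find?_append, ih, List.find?]
    clear ih
    cases e2 : (PySem.Str.len i == (2 : Int)) <;>
      cases e3 : (PySem.Str.len i == (3 : Int)) <;>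
        cases e4 : (PySem.Str.len i == (4 : Int)) <;>
          cases e7 : (PySem.Str.len i == (7 : Int)) <;>
            simp_all

-- ===== VERDICT (by name: the statement is the Claim_ definition above) =====
theorem find_uniques_spec : Claim_equal_find_uniques := by
  intro digits _ _
  unfold Spec_find_uniques find_uniques find_uniques_alt find_uniques_alt_pick
  simp only [find_uniques_inv, Option.or_none]
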